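-- pv_equiv track=rewrite | github.com/KKosukeee/CodingQuestions | LeetCode/1208_get_equal_substrings_within_budget.py | cleaner_solution
-- ===== SOURCE A (Python) =====
-- def cleaner_solution(s, t, maxCost):
--     """
--     Slightly cleaner solution that runs in O(N) in time and O(1) in space
--
--     Args:
--         s(str):
--         t(str):
--         maxCost(int):
--
--     Returns:
--         int:
--
--     """
--     i, max_len = 0, 0
--     for j in range(len(s)):
--         maxCost -= abs(ord(s[j]) - ord(t[j]))
--         if maxCost < 0:
--             maxCost += abs(ord(s[i]) - ord(t[i]))
--             i += 1
--         if maxCost >= 0: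
--             max_len = max(max_len, j - i + 1)
--     return max_len
-- ===== SOURCE B (Python) =====
-- def cleaner_solution(s, t, maxCost):
--     """Prefix sums + per-end binary search instead of a two-pointer window."""
--     n = len(s)
--     prefix = [0]
--     for k in range(n):
--         prefix.append(prefix[-1] + abs(ord(s[k]) - ord(t[k])))
--     best = 0
--     for j in range(n):
--         target = prefix[j + 1] - maxCost
--         lo, hi = 0, len(prefix)
--         while lo < hi:
--             mid = (lo + hi) // 2
--             if prefix[mid] < target:
--                 lo = mid + 1
--             else:
--                 hi = mid
--         cand = j + 1 - lo
--         if cand > best: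
--             best = cand
--     return best
-- ===== Notes on version B (the rewrite author's own statement) =====
-- stated objective: alternative
-- what changed: Replaced A's single-pass two-pointer sliding window by a precomputed prefix-sum cost array with a per-end-index hand-rolled binary search (bisect_left) for the smallest feasible window start.
import Mathlib
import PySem

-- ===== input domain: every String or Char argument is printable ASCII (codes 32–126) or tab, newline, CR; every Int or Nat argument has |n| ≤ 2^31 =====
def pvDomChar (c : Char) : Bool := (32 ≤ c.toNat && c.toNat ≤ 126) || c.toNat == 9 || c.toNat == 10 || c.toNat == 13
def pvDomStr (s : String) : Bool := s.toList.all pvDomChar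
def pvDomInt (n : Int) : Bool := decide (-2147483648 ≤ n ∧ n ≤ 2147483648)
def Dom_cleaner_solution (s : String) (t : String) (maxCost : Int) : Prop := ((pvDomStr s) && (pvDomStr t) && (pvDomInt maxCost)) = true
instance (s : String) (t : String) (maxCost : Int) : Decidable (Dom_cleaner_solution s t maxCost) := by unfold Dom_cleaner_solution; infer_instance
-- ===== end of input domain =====

-- B replaces A's two-pointer sliding window by a prefix-sum table with a per-end binary search
-- (alternative algorithm, not faster: O(n log n) vs A's O(n)).


-- ===== PORT A =====
-- abs(ord(s[k]) - ord(t[k])); indices used by either port are in range on Pre_, so getD's default is never read there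
def pvCost (sl tl : List Char) (k : Nat) : Int :=
  |((sl.getD k ' ').toNat : Int) - ((tl.getD k ' ').toNat : Int)|

-- one iteration of A's loop; state (i, maxCost, max_len)
def pvAstep (sl tl : List Char) (st : Nat × Int × Int) (j : Nat) : Nat × Int × Int :=
  let rem := st.2.1 - pvCost sl tl j
  if rem < 0 then
    let rem2 := rem + pvCost sl tl st.1
    let i2 := st.1 + 1
    if 0 ≤ rem2 then (i2, rem2, max st.2.2 ((j : Int) - (i2 : Int) + 1))
    else (i2, rem2, st.2.2)
  else (st.1, rem, max st.2.2 ((j : Int) - (st.1 : Int) + 1))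

def cleaner_solution (s : String) (t : String) (maxCost : Int) : Int :=
  ((List.range s.toList.length).foldl (pvAstep s.toList t.toList) (0, maxCost, 0)).2.2

-- ===== PORT B =====
-- prefix = [0]; for k in range(len(s)): prefix.append(prefix[-1] + abs(ord(s[k]) - ord(t[k])))
def pvBuildPrefix (sl tl : List Char) : List Int :=
  (List.range sl.length).foldl (fun p k => p ++ [PySem.List.pyGetD p (-1) 0 + pvCost sl tl k]) [0]

-- the hand-rolled bisect_left loop of Source B
def pvBisect (p : List Int) (target : Int) (lo hi : Nat) : Nat :=
  if h : lo < hi then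
    let mid := (lo + hi) / 2
    if p.getD mid 0 < target then pvBisect p target (mid + 1) hi
    else pvBisect p target lo mid
  else lo
termination_by hi - lo
decreasing_by all_goals omega

-- one iteration of Source B's second loop
def pvBstep (pfx : List Int) (maxCost : Int) (best : Int) (j : Nat) : Int :=
  let target := pfx.getD (j + 1) 0 - maxCost
  let lo := pvBisect pfx target 0 pfx.length
  let cand := (j : Int) + 1 - (lo : Int)
  if cand > best then cand else best

def cleaner_solution_alt (s : String) (t : String) (maxCost : Int) : Int :=
  let pfx := pvBuildPrefix s.toList t.toList
  (List.range s.toList.length).foldl (pvBstep pfx maxCost) 0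

-- ===== PRECONDITION & SPEC =====
-- Pre_ excludes only the inputs where Python A raises IndexError: len(t) < len(s) (t[j] missing); B raises there too.
def Pre_cleaner_solution (s : String) (t : String) (maxCost : Int) : Prop :=
  s.toList.length ≤ t.toList.length
instance (s : String) (t : String) (maxCost : Int) : Decidable (Pre_cleaner_solution s t maxCost) := by
  unfold Pre_cleaner_solution; infer_instance
def pvWitness_cleaner_solution : String × String × Int := ("abcd", "bcdf", 3)

def Spec_cleaner_solution (s : String) (t : String) (maxCost : Int) (out : Int) : Prop := out = cleaner_solution_alt s t maxCost
instance (s : String) (t : String) (maxCost : Int) (out : Int) : Decidable (Spec_cleaner_solution s t maxCost out) := by unfold Spec_cleaner_solution; infer_instance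

-- ===== CLAIM (what is proved, stated in full; the proofs are below) =====
def Claim_equal_cleaner_solution : Prop := ∀ (s : String) (t : String) (maxCost : Int), Dom_cleaner_solution s t maxCost → Pre_cleaner_solution s t maxCost → Spec_cleaner_solution s t maxCost (cleaner_solution s t maxCost)

-- ===== LEMMAS AND PROOFS =====

-- mathematical prefix sum: pvPf k = sum of the first k per-position costs
def pvPf (sl tl : List Char) (k : Nat) : Int := ((List.range k).map (pvCost sl tl)).sum

theorem pvCost_nonneg (sl tl : List Char) (k : Nat) : 0 ≤ pvCost sl tl k := abs_nonneg _

theorem pvPf_succ (sl tl : List Char) (k : Nat) :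
    pvPf sl tl (k + 1) = pvPf sl tl k + pvCost sl tl k := by
  simp [pvPf, List.range_succ]

theorem pvPf_mono (sl tl : List Char) {a b : Nat} (h : a ≤ b) :
    pvPf sl tl a ≤ pvPf sl tl b := by
  induction b, h using Nat.le_induction with
  | base => exact le_refl _
  | succ b _ ih => rw [pvPf_succ]; have := pvCost_nonneg sl tl b; omega

theorem pvBuildPrefix_aux (sl tl : List Char) (m : Nat) :
    (List.range m).foldl (fun p k => p ++ [PySem.List.pyGetD p (-1) 0 + pvCost sl tl k]) [0]
      = (List.range (m + 1)).map (pvPf sl tl) := by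
  induction m with
  | zero => simp [pvPf]
  | succ m ih =>
      rw [List.range_succ, List.foldl_append, ih, List.foldl_cons, List.foldl_nil,
        List.range_succ (n := m + 1), List.map_append, List.range_succ (n := m), List.map_append,
        List.map_singleton, List.map_singleton, PySem.List.pyGetD_neg_one_append_singleton,
        ← pvPf_succ, List.append_assoc]

theorem pvBuildPrefix_eq (sl tl : List Char) :
    pvBuildPrefix sl tl = (List.range (sl.length + 1)).map (pvPf sl tl) :=
  pvBuildPrefix_aux sl tl sl.length

theorem pvBisect_spec (p : List Int) (t : Int)
    (hm : ∀ a b : Nat, a ≤ b → b < p.length → p.getD a 0 ≤ p.getD b 0) :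
    ∀ (n lo hi : Nat), hi - lo ≤ n → lo ≤ hi → hi ≤ p.length →
      lo ≤ pvBisect p t lo hi ∧ pvBisect p t lo hi ≤ hi ∧
      (∀ k, lo ≤ k → k < pvBisect p t lo hi → p.getD k 0 < t) ∧
      (∀ k, pvBisect p t lo hi ≤ k → k < hi → t ≤ p.getD k 0) := by
  intro n
  induction n with
  | zero =>
      intro lo hi h1 h2 _
      have hlh : lo = hi := by omega
      rw [pvBisect, dif_neg (by omega)]
      exact ⟨le_refl _, h2, fun k hk hk' => by omega, fun k hk hk' => by omega⟩
  | succ n ih =>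
      intro lo hi h1 h2 hlen
      by_cases hlt : lo < hi
      · rw [pvBisect, dif_pos hlt]
        simp only
        set mid := (lo + hi) / 2 with hmid
        have hmlo : lo ≤ mid := by omega
        have hmhi : mid < hi := by omega
        by_cases hc : p.getD mid 0 < t
        · rw [if_pos hc]
          obtain ⟨r1, r2, r3, r4⟩ := ih (mid + 1) hi (by omega) (by omega) hlen
          refine ⟨by omega, r2, ?_, r4⟩
          intro k hk hk'
          by_cases hkm : k ≤ mid
          · exact lt_of_le_of_lt (hm k mid hkm (by omega)) hc
          · exact r3 k (by omega) hk'
        · rw [if_neg hc]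
          rw [not_lt] at hc
          obtain ⟨r1, r2, r3, r4⟩ := ih lo mid (by omega) (by omega) (by omega)
          refine ⟨r1, by omega, r3, ?_⟩
          intro k hk hk'
          by_cases hkm : k < mid
          · exact r4 k hk hkm
          · exact le_trans hc (hm mid k (by omega) (by omega))
      · rw [pvBisect, dif_neg hlt]
        exact ⟨le_refl _, h2, fun k hk hk' => by omega, fun k hk hk' => by omega⟩

-- proof-only abbreviations for the two folds
def pvA (sl tl : List Char) (M : Int) (m : Nat) : Nat × Int × Int :=
  (List.range m).foldl (pvAstep sl tl) (0, M, 0)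
def pvB (sl tl : List Char) (M : Int) (m : Nat) : Int :=
  (List.range m).foldl (pvBstep (pvBuildPrefix sl tl) M) 0

theorem pvBuildPrefix_len (sl tl : List Char) : (pvBuildPrefix sl tl).length = sl.length + 1 := by
  simp [pvBuildPrefix_eq]

theorem pvBuildPrefix_getD (sl tl : List Char) {k : Nat} (h : k ≤ sl.length) :
    (pvBuildPrefix sl tl).getD k 0 = pvPf sl tl k := by
  rw [pvBuildPrefix_eq]
  exact PySem.List.getD_map_range _ _ _ _ (by omega)

theorem pvBuildPrefix_mono (sl tl : List Char) :
    ∀ a b : Nat, a ≤ b → b < (pvBuildPrefix sl tl).length →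
      (pvBuildPrefix sl tl).getD a 0 ≤ (pvBuildPrefix sl tl).getD b 0 := by
  intro a b hab hb
  rw [pvBuildPrefix_len] at hb
  rw [pvBuildPrefix_getD sl tl (by omega), pvBuildPrefix_getD sl tl (by omega)]
  exact pvPf_mono sl tl hab

-- the joint invariant tying A's state (i, rem, ml) after m steps to B's running best after m steps
theorem pvMain (sl tl : List Char) (M : Int) (m : Nat) (hm : m ≤ sl.length) :
    (pvA sl tl M m).1 ≤ m ∧
    (pvA sl tl M m).2.1 = M - (pvPf sl tl m - pvPf sl tl (pvA sl tl M m).1) ∧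
    (pvA sl tl M m).2.2 = (m : Int) - ((pvA sl tl M m).1 : Int) ∧
    (∀ a : Nat, a < (pvA sl tl M m).1 → M < pvPf sl tl m - pvPf sl tl a) ∧
    pvB sl tl M m = (pvA sl tl M m).2.2 := by
  induction m with
  | zero => simp [pvA, pvB, pvPf]
  | succ m ih =>
      obtain ⟨h1, h2, h3, h4, h5⟩ := ih (by omega)
      have hA : pvA sl tl M (m + 1) = pvAstep sl tl (pvA sl tl M m) m := by
        simp [pvA, List.range_succ]
      have hB : pvB sl tl M (m + 1) = pvBstep (pvBuildPrefix sl tl) M (pvB sl tl M m) m := by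
        simp [pvB, List.range_succ]
      set q := pvA sl tl M m with hq
      set i := q.1 with hi
      set rem := q.2.1 with hrem
      set ml := q.2.2 with hml
      -- the B side: target and the binary-search result over the full prefix list
      have hm1 : m + 1 ≤ sl.length := hm
      have htgt : (pvBuildPrefix sl tl).getD (m + 1) 0 = pvPf sl tl (m + 1) :=
        pvBuildPrefix_getD sl tl hm1
      set pfx := pvBuildPrefix sl tl with hpfx
      set target := pfx.getD (m + 1) 0 - M with htargetdef
      set r := pvBisect pfx target 0 pfx.length with hr
      obtain ⟨-, hr2, hr3, hr4⟩ :=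
        pvBisect_spec pfx target (pvBuildPrefix_mono sl tl) pfx.length 0 pfx.length
          (by omega) (by omega) (le_refl _)
      rw [pvBuildPrefix_len] at hr2
      have hrlow : ∀ k : Nat, k < r → k ≤ sl.length → pvPf sl tl k < pvPf sl tl (m + 1) - M := by
        intro k hk hk'
        have := hr3 k (by omega) hk
        rwa [pvBuildPrefix_getD sl tl hk', htargetdef, htgt] at this
      have hrhigh : ∀ k : Nat, r ≤ k → k ≤ sl.length → pvPf sl tl (m + 1) - M ≤ pvPf sl tl k := by
        intro k hk hk'
        have := hr4 k hk (by rw [pvBuildPrefix_len]; omega)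
        rwa [pvBuildPrefix_getD sl tl hk', htargetdef, htgt] at this
      have hBval : pvBstep pfx M (pvB sl tl M m) m
          = if (m : Int) + 1 - (r : Int) > ml then (m : Int) + 1 - (r : Int) else ml := by
        rw [pvBstep, h5]
      have hPfm : pvPf sl tl (m + 1) = pvPf sl tl m + pvCost sl tl m := pvPf_succ sl tl m
      have hPfi : pvPf sl tl (i + 1) = pvPf sl tl i + pvCost sl tl i := pvPf_succ sl tl i
      have hc_nonneg := pvCost_nonneg sl tl m
      rw [hA, hB, hBval]
      by_cases c1 : rem - pvCost sl tl m < 0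
      · by_cases c2 : 0 ≤ rem - pvCost sl tl m + pvCost sl tl i
        · -- window shifts by one and is feasible again: A keeps size, B's search lands on i+1
          have hAval : pvAstep sl tl q m
              = (i + 1, rem - pvCost sl tl m + pvCost sl tl i,
                  max ml ((m : Int) - ((i + 1 : Nat) : Int) + 1)) := by
            simp [pvAstep, ← hrem, ← hi, ← hml, c1, c2]
          have hreq : r = i + 1 := by
            rcases Nat.lt_trichotomy r (i + 1) with h | h | h
            · exfalso
              have hk := hrhigh r (le_refl _) (by omega)
              rcases Nat.lt_or_ge r i with hri | hri
              · have := h4 r hri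
                have := pvPf_mono sl tl (Nat.le_succ m)
                omega
              · have : r = i := by omega
                rw [this] at hk
                omega
            · exact h
            · exfalso
              have := hrlow (i + 1) h (by omega)
              omega
          rw [hAval]
          rw [hreq]
          refine ⟨by omega, by push_cast; omega, ?_, ?_, ?_⟩
          · simp only []
            push_cast
            omega
          · intro a ha
            simp only [] at ha
            rcases Nat.lt_or_ge a i with h | h
            · have := h4 a h
              omega
            · have : a = i := by omega
              subst this
              omega
          · simp only []
            push_cast
            have : ¬ ((m : Int) + 1 - ((i : Int) + 1) > ml) := by omega
            rw [if_neg this]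
            omega
        · -- window shifts and is still infeasible: A keeps max_len, B's candidate cannot beat it
          have hAval : pvAstep sl tl q m
              = (i + 1, rem - pvCost sl tl m + pvCost sl tl i, ml) := by
            simp [pvAstep, ← hrem, ← hi, ← hml, c1, c2]
          rw [hAval]
          have hcand : ¬ ((m : Int) + 1 - (r : Int) > ml) := by
            intro hgt
            have hri : r ≤ i := by omega
            have hk := hrhigh r (le_refl _) (by omega)
            rcases Nat.lt_or_ge r i with h | h
            · have := h4 r h
              omega
            · have : r = i := by omega
              rw [this] at hk
              omega
          rw [if_neg hcand]
          refine ⟨by omega, by push_cast; omega, by push_cast; omega, ?_, by omega⟩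
          intro a ha
          simp only [] at ha
          rcases Nat.lt_or_ge a i with h | h
          · have := h4 a h
            omega
          · have : a = i := by omega
            subst this
            omega
      · -- budget still covers the grown window: A grows it, B's search lands on i
        have hAval : pvAstep sl tl q m
            = (i, rem - pvCost sl tl m, max ml ((m : Int) - (i : Int) + 1)) := by
          simp [pvAstep, ← hrem, ← hi, ← hml, c1]
        have hreq : r = i := by
          rcases Nat.lt_trichotomy r i with h | h | h
          · exfalso
            have hk := hrhigh r (le_refl _) (by omega)
            have := h4 r h
            omega
          · exact h
          · exfalso
            have := hrlow i h (by omega)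
            omega
        rw [hAval]
        rw [hreq]
        refine ⟨by omega, by push_cast; omega, by push_cast; omega, ?_, ?_⟩
        · intro a ha
          simp only [] at ha
          have := h4 a ha
          omega
        · simp only []
          have : ((m : Int) + 1 - (i : Int) > ml) := by omega
          rw [if_pos this]
          omega

-- ===== VERDICT (by name: the statement is the Claim_ definition above) =====
theorem cleaner_solution_spec : Claim_equal_cleaner_solution := by
  intro s t maxCost _ _
  unfold Spec_cleaner_solution cleaner_solution cleaner_solution_alt
  exact ((pvMain s.toList t.toList maxCost s.toList.length (le_refl _)).2.2.2.2).symm
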